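-- pv_equiv track=rewrite | github.com/whatshap/whatshap | whatshap/phaseg.py | find_largest_component
-- ===== SOURCE A (Python) =====
-- from collections import defaultdict
--
-- def find_largest_component(components):
-- 	"""
-- 	Determine the largest component and return a sorted list of positions
-- 	contained in it.
-- 	components -- dictionary mapping positin to block_id as returned by find_components.
-- 	"""
-- 	blocks = defaultdict(list)
-- 	for position, block_id in components.items():
-- 		blocks[block_id].append(position)
-- 	largest = []
-- 	for block in blocks.values():
-- 		if len(block) > len(largest):
-- 			largest = block
-- 	largest.sort()
-- 	return largest
-- ===== SOURCE B (Python) =====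
-- from collections import Counter
--
-- def find_largest_component(components):
-- 	counts = Counter(components.values())
-- 	if not counts:
-- 		return []
-- 	best = max(counts, key=counts.get)
-- 	return sorted(position for position, block_id in components.items() if block_id == best)
-- ===== Notes on version B (the rewrite author's own statement) =====
-- stated objective: alternative
-- what changed: Instead of materialising every block's full position list and keeping a running-longest reference, B counts block sizes with Counter(components.values()), picks the first maximal block id with max(counts, key=counts.get) (same strictly-greater tie-break as A), and then collects that one block's positions in a second pass before sorting.
import Mathlib
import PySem

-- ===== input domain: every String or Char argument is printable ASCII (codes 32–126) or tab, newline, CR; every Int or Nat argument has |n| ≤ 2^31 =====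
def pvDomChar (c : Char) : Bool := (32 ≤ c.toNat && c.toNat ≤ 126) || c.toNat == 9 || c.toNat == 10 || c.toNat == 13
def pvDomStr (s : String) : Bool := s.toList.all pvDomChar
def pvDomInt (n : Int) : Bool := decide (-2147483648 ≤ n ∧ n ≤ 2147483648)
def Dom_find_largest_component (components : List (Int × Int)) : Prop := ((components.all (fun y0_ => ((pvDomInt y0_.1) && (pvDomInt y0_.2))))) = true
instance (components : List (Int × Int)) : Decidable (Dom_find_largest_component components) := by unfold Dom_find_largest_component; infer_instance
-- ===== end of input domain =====

-- B counts block sizes first (Counter), picks the first maximal block id, then collects and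
-- sorts just that block's positions, instead of A's building every block's position list and
-- keeping a running-longest reference. Objective: alternative decomposition, same cost.


-- ===== PORT A =====
def find_largest_component (components : List (Int × Int)) : List Int :=
  -- blocks = defaultdict(list); for position, block_id in components.items(): blocks[block_id].append(position)
  let blocks : PySem.Dict Int (List Int) :=
    components.foldl (fun d p => d.modify p.2 [] (fun l => l ++ [p.1])) PySem.Dict.empty
  -- largest = []; for block in blocks.values(): if len(block) > len(largest): largest = block
  let largest : List Int :=
    blocks.values.foldl (fun largest block => if largest.length < block.length then block else largest) []
  -- largest.sort(); return largest
  PySem.List.sorted largest (fun x => x) false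

-- ===== PORT B =====
def find_largest_component_alt (components : List (Int × Int)) : List Int :=
  -- counts = Counter(components.values())
  let counts : PySem.Dict Int Int := PySem.Dict.counter (components.map (fun p => p.2))
  -- if not counts: return []; best = max(counts, key=counts.get)
  match PySem.List.max? counts.keys (fun k => counts.getD k 0) with
  | none => []
  | some best =>
      -- sorted(position for position, block_id in components.items() if block_id == best)
      PySem.List.sorted ((components.filter (fun p => p.2 == best)).map (fun p => p.1)) (fun x => x) false

-- ===== PRECONDITION & SPEC =====
-- Pre_ excludes association lists with duplicate positions (first components): such a list does not
-- encode any Python dict — dict construction collapses duplicate keys before A ever runs.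
def Pre_find_largest_component (components : List (Int × Int)) : Prop :=
  (components.map Prod.fst).Nodup
instance (components : List (Int × Int)) : Decidable (Pre_find_largest_component components) := by
  unfold Pre_find_largest_component; infer_instance
def pvWitness_find_largest_component : (List (Int × Int)) := [(1, 2), (3, 2), (5, 7)]

def Spec_find_largest_component (components : List (Int × Int)) (out : List Int) : Prop := out = find_largest_component_alt components
instance (components : List (Int × Int)) (out : List Int) : Decidable (Spec_find_largest_component components out) := by unfold Spec_find_largest_component; infer_instance

-- ===== CLAIM (what is proved, stated in full; the proofs are below) =====
def Claim_equal_find_largest_component : Prop := ∀ (components : List (Int × Int)), Dom_find_largest_component components → Pre_find_largest_component components → Spec_find_largest_component components (find_largest_component components)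

-- ===== LEMMAS AND PROOFS =====

-- the positions of block k, in input order (what A's blocks[k] holds, and what B filters out)
def pvGroup (components : List (Int × Int)) (k : Int) : List Int :=
  (components.filter (fun p => p.2 == k)).map (fun p => p.1)

-- A's grouping dict, looked up: blocks.getD k [] is exactly pvGroup
theorem pvBlocks_getD (components : List (Int × Int)) (k : Int) :
    (components.foldl (fun d p => d.modify p.2 [] (fun l => l ++ [p.1]))
      (PySem.Dict.empty : PySem.Dict Int (List Int))).getD k []
    = pvGroup components k := by
  have h : (components.foldl (fun d p => d.modify p.2 [] (fun l => l ++ [p.1]))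
      (PySem.Dict.empty : PySem.Dict Int (List Int)))
      = ((components.map (fun p => (p.2, p.1))).foldl
          (fun d q => d.modify q.1 [] (fun l => l ++ [q.2])) PySem.Dict.empty) := by
    rw [List.foldl_map]
  rw [h, PySem.Dict.getD_foldl_modify_append]
  simp [pvGroup, List.filter_map, Function.comp_def]

-- A's grouping dict has key list Set.ofList of the block ids, in first-occurrence order
theorem pvBlocks_keys (components : List (Int × Int)) :
    (components.foldl (fun d p => d.modify p.2 [] (fun l => l ++ [p.1]))
      (PySem.Dict.empty : PySem.Dict Int (List Int))).keys
    = PySem.Set.ofList (components.map (fun p => p.2)) := by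
  have := PySem.Dict.keys_foldl_modify_key components (fun p => p.2) ([] : List Int)
    (fun _ p l => l ++ [p.1]) PySem.Dict.empty
  simpa [PySem.Set.update_nil_left] using this

-- Python's max(..., key=...) over a nonempty list as a running first-maximal fold
theorem pvMax?_cons {α κ : Type} [LinearOrder κ] (k0 : α) (K : List α) (c : α → κ) :
    PySem.List.max? (k0 :: K) c
    = some (K.foldl (fun m k => if c m < c k then k else m) k0) := by
  simp only [PySem.List.max?, List.foldl_cons]
  induction K generalizing k0 with
  | nil => rfl
  | cons k K ih => simp only [List.foldl_cons]; split <;> exact ih _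

-- A's running-longest fold tracks the g-image of B's running first-maximal key fold
theorem pvFold_track (g : Int → List Int) (c : Int → Int)
    (hc : ∀ k, c k = ((g k).length : Int)) (K : List Int) (m : Int) :
    K.foldl (fun acc k => if acc.length < (g k).length then g k else acc) (g m)
    = g (K.foldl (fun m k => if c m < c k then k else m) m) := by
  induction K generalizing m with
  | nil => rfl
  | cons k K ih =>
      simp only [List.foldl_cons]
      by_cases h : (g m).length < (g k).length
      · rw [if_pos h, if_pos (show c m < c k by rw [hc, hc]; exact_mod_cast h), ih]
      · rw [if_neg h, if_neg (fun hh => h (by rw [hc, hc] at hh; exact_mod_cast hh)), ih]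

-- the two whole programs agree
theorem pvMain (components : List (Int × Int)) :
    find_largest_component components = find_largest_component_alt components := by
  unfold find_largest_component find_largest_component_alt
  simp only [PySem.Dict.keys_counter]
  have hval : ∀ k : Int,
      (PySem.Dict.counter (components.map (fun p => p.2))).getD k 0
      = ((pvGroup components k).length : Int) := by
    intro k
    rw [PySem.Dict.getD_counter]
    simp [pvGroup, List.count_eq_countP, List.countP_eq_length_filter, List.filter_map, Function.comp_def]
  set K := PySem.Set.ofList (components.map (fun p => p.2)) with hK
  have hnodup : ((components.foldl (fun d p => d.modify p.2 [] (fun l => l ++ [p.1]))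
      (PySem.Dict.empty : PySem.Dict Int (List Int))).keys).Nodup := by
    rw [pvBlocks_keys]; exact PySem.Set.nodup_ofList _
  have hvalues : (components.foldl (fun d p => d.modify p.2 [] (fun l => l ++ [p.1]))
      (PySem.Dict.empty : PySem.Dict Int (List Int))).values
      = K.map (fun k => pvGroup components k) := by
    rw [PySem.Dict.values_eq_map_keys _ hnodup ([] : List Int), pvBlocks_keys]
    exact List.map_congr_left (fun k _ => pvBlocks_getD components k)
  rw [hvalues]
  cases hKc : K with
  | nil => simp [PySem.List.max?, PySem.List.sorted]
  | cons k0 Krest =>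
      have hk0mem : k0 ∈ components.map (fun p => p.2) := by
        have : k0 ∈ K := by rw [hKc]; exact List.mem_cons_self
        rw [hK] at this; exact (PySem.Set.mem_ofList _ _).mp this
      have hpos : 0 < (pvGroup components k0).length := by
        rcases List.mem_map.mp hk0mem with ⟨p, hp, hpk⟩
        have : p.1 ∈ pvGroup components k0 := by
          simp only [pvGroup, List.mem_map]
          exact ⟨p, List.mem_filter.mpr ⟨hp, by simp [hpk]⟩, rfl⟩
        exact List.length_pos_of_mem this
      rw [pvMax?_cons]
      simp only [List.map_cons, List.foldl_cons, List.length_nil]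
      rw [if_pos hpos, List.foldl_map, pvFold_track (pvGroup components)
        (fun k => (PySem.Dict.counter (components.map (fun p => p.2))).getD k 0) hval]
      rfl

-- ===== VERDICT (by name: the statement is the Claim_ definition above) =====
theorem find_largest_component_spec : Claim_equal_find_largest_component := by
  intro components _ _
  unfold Spec_find_largest_component
  exact pvMain components
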